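-- pv_equiv track=rewrite | github.com/zizudana/python-for-coding-test | 프로그래머스/Lv2/방금그곡.py | solution
-- ===== SOURCE A (Python) =====
-- def new_music(music): # 소문자로 바꾸기
-- 	tmp = ""
-- 	i = 0
-- 	while i+1 < len(music):
-- 		if music[i+1] == "#":
-- 			tmp += music[i].lower()
-- 			i += 1
-- 		else:
-- 			tmp += music[i]
-- 		i += 1
-- 	if i == len(music)-1:
-- 		tmp += music[i]
-- 	return tmp
--
-- def solution(m, musicinfos):
-- 	answer = []
-- 	m = new_music(m)
-- 	for musicinfo in musicinfos:
-- 		musicinfo = list(musicinfo.split(','))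
--
-- 		# 재생시간 계산 (musiclen)
-- 		musicinfo[0] = list(map(int, musicinfo[0].split(':'))) # 시작시간
-- 		musicinfo[1] = list(map(int, musicinfo[1].split(':'))) # 끝난시간
-- 		musiclen = (musicinfo[1][0] * 60 + musicinfo[1][1]) - (musicinfo[0][0] * 60 + musicinfo[0][1])
--
-- 		# 실제 재생된 음악 구하기
-- 		music = new_music(musicinfo[3])
-- 		tmp = ""
-- 		tmp += music * (musiclen // len(music))
-- 		tmp += music[:musiclen % len(music)]
--
-- 		# 멜로디가 있는지 확인
-- 		if m in tmp:
-- 			answer.append((musicinfo[2], musiclen)) # (음악제목, 재생시간)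
--
-- 	if not answer:
-- 		return "(None)"
-- 	if len(answer) > 1:
-- 		answer.sort(key=lambda x:-x[1]) # 재생시간이 긴 순으로 정렬
-- 	return answer[0][0]
-- ===== SOURCE B (Python) =====
-- def normalize(music):
--     out = []
--     i = 0
--     n = len(music)
--     while i < n:
--         if i + 1 < n and music[i + 1] == '#':
--             out.append(music[i].lower())
--             i += 2
--         else:
--             out.append(music[i])
--             i += 1
--     return ''.join(out)
--
-- def minutes(t):
--     nums = [int(x) for x in t.split(':')]
--     return nums[0] * 60 + nums[1]
--
-- def solution(m, musicinfos):
--     target = normalize(m)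
--     best_title = "(None)"
--     best_len = None
--     for info in musicinfos:
--         parts = info.split(',')
--         dur = minutes(parts[1]) - minutes(parts[0])
--         sheet = normalize(parts[3])
--         played = sheet * (dur // len(sheet)) + sheet[:dur % len(sheet)]
--         if target in played and (best_len is None or dur > best_len):
--             best_len = dur
--             best_title = parts[2]
--     return best_title
-- ===== Notes on version B (the rewrite author's own statement) =====
-- stated objective: simpler
-- what changed: A collects every matching (title, duration) pair in a list and stable-sorts it by descending duration to pick the answer; B keeps a single running best (title, duration) updated with a strict '>' so the earliest longest match wins, with the time-string parsing factored into a minutes() helper and the normalizer rewritten as one combined-test loop.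
import Mathlib
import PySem

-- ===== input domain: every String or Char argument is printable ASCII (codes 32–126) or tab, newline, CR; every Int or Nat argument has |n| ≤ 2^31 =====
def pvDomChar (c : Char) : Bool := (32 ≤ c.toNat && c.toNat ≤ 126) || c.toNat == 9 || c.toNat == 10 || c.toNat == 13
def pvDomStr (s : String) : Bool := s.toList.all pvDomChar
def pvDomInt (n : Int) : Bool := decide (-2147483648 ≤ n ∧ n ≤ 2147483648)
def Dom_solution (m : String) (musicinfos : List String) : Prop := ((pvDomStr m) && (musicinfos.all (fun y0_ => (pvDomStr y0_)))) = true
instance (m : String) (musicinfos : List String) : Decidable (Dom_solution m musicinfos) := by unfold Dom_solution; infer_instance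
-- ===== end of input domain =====

-- B replaces A's collect-all-matches-then-sort aggregation by a single-pass running maximum
-- (strict '>', so the earliest longest match wins, like A's stable sort); objective: simpler.

-- ===== PORT A =====
-- new_music: the while loop over index i becomes the obvious two-character-lookahead recursion;
-- the 'if i == len-1' trailing-character fixup is the [c] case.
def newMusicA : List Char → List Char
  | c1 :: c2 :: rest =>
      if c2 = '#' then PySem.Chars.lowerChar c1 :: newMusicA rest
      else c1 :: newMusicA (c2 :: rest)
  | [c] => [c]
  | [] => []

-- outside Pre_solution Python raises (IndexError / ValueError / ZeroDivisionError); there the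
-- pyGetD / (ofChars? …).getD 0 defaults are never the claimed value (Pre_ excludes those inputs)
def solution (m : String) (musicinfos : List String) : String :=
  let m' := newMusicA m.toList
  let answer := musicinfos.foldl (fun (answer : List (String × Int)) musicinfo =>
    let parts := PySem.Chars.splitOn musicinfo.toList [',']
    let t0 := (PySem.Chars.splitOn (PySem.List.pyGetD parts 0 []) [':']).map
        (fun x => (PySem.Int.ofChars? x).getD 0)
    let t1 := (PySem.Chars.splitOn (PySem.List.pyGetD parts 1 []) [':']).map
        (fun x => (PySem.Int.ofChars? x).getD 0)
    let musiclen := (PySem.List.pyGetD t1 0 0 * 60 + PySem.List.pyGetD t1 1 0)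
        - (PySem.List.pyGetD t0 0 0 * 60 + PySem.List.pyGetD t0 1 0)
    let music := newMusicA (PySem.List.pyGetD parts 3 [])
    let tmp := PySem.List.pyRepeat music (PySem.Int.floordiv musiclen (music.length : Int))
        ++ PySem.List.slice music none (some (PySem.Int.mod musiclen (music.length : Int)))
    if PySem.Chars.isIn m' tmp then answer ++ [(String.ofList (PySem.List.pyGetD parts 2 []), musiclen)]
    else answer) []
  if answer = [] then "(None)"
  else
    let answer := if 1 < answer.length then PySem.List.sorted answer (fun x => -x.2) else answer
    (PySem.List.pyGetD answer 0 ("", 0)).1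

-- ===== PORT B =====
-- normalize: B's single while loop with the combined 'i+1 < n and next == #' test
def normChars : List Char → List Char
  | [] => []
  | [c] => [c]
  | c :: d :: rest =>
      if d = '#' then PySem.Chars.lowerChar c :: normChars rest
      else c :: normChars (d :: rest)

def minutesB (t : List Char) : Int :=
  let nums := (PySem.Chars.splitOn t [':']).map (fun x => (PySem.Int.ofChars? x).getD 0)
  PySem.List.pyGetD nums 0 0 * 60 + PySem.List.pyGetD nums 1 0

def solution_alt (m : String) (musicinfos : List String) : String :=
  let target := normChars m.toList
  (musicinfos.foldl (fun (best : String × Option Int) info =>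
    let parts := PySem.Chars.splitOn info.toList [',']
    let dur := minutesB (PySem.List.pyGetD parts 1 []) - minutesB (PySem.List.pyGetD parts 0 [])
    let sheet := normChars (PySem.List.pyGetD parts 3 [])
    let played := PySem.List.pyRepeat sheet (PySem.Int.floordiv dur (sheet.length : Int))
        ++ PySem.List.slice sheet none (some (PySem.Int.mod dur (sheet.length : Int)))
    if PySem.Chars.isIn target played && best.2.all (fun b => decide (b < dur))
    then (String.ofList (PySem.List.pyGetD parts 2 []), some dur)
    else best) ("(None)", none)).1

-- ===== PRECONDITION & SPEC =====
-- Pre_: exactly the inputs on which Python A returns (each info has ≥ 4 comma fields, the two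
-- time fields split on ':' into ≥ 2 pieces that all parse as int, and the melody field is
-- nonempty); elsewhere A raises IndexError / ValueError / ZeroDivisionError.
def Pre_solution (m : String) (musicinfos : List String) : Prop :=
  ∀ info ∈ musicinfos,
    4 ≤ (PySem.Chars.splitOn info.toList [',']).length ∧
    (∀ t ∈ [PySem.List.pyGetD (PySem.Chars.splitOn info.toList [',']) 0 [],
            PySem.List.pyGetD (PySem.Chars.splitOn info.toList [',']) 1 []],
      2 ≤ (PySem.Chars.splitOn t [':']).length ∧
      ∀ p ∈ PySem.Chars.splitOn t [':'], (PySem.Int.ofChars? p).isSome = true) ∧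
    PySem.List.pyGetD (PySem.Chars.splitOn info.toList [',']) 3 [] ≠ []
instance (m : String) (musicinfos : List String) : Decidable (Pre_solution m musicinfos) := by
  unfold Pre_solution; infer_instance

def pvWitness_solution : String × List String := ("ABC", ["00:00,00:03,WORLD,ABC"])

def Spec_solution (m : String) (musicinfos : List String) (out : String) : Prop :=
  out = solution_alt m musicinfos
instance (m : String) (musicinfos : List String) (out : String) : Decidable (Spec_solution m musicinfos out) := by
  unfold Spec_solution; infer_instance

-- ===== CLAIM (what is proved, stated in full; the proofs are below) =====
def Claim_equal_solution : Prop := ∀ (m : String) (musicinfos : List String),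
  Dom_solution m musicinfos → Pre_solution m musicinfos →
  Spec_solution m musicinfos (solution m musicinfos)

-- ===== LEMMAS AND PROOFS =====

-- the two normalizers compute the same string
theorem norm_eq : ∀ cs : List Char, normChars cs = newMusicA cs
  | [] => rfl
  | [_] => rfl
  | c :: d :: rest => by
      by_cases h : d = '#' <;>
        simp [normChars, newMusicA, h, norm_eq rest, norm_eq (d :: rest)]

-- per-info produced (title, duration) pair and match test, as both ports compute them
def pvF (info : String) : String × Int :=
  let parts := PySem.Chars.splitOn info.toList [',']
  let t0 := (PySem.Chars.splitOn (PySem.List.pyGetD parts 0 []) [':']).map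
      (fun x => (PySem.Int.ofChars? x).getD 0)
  let t1 := (PySem.Chars.splitOn (PySem.List.pyGetD parts 1 []) [':']).map
      (fun x => (PySem.Int.ofChars? x).getD 0)
  (String.ofList (PySem.List.pyGetD parts 2 []),
   (PySem.List.pyGetD t1 0 0 * 60 + PySem.List.pyGetD t1 1 0)
     - (PySem.List.pyGetD t0 0 0 * 60 + PySem.List.pyGetD t0 1 0))

def pvP (m' : List Char) (info : String) : Bool :=
  let parts := PySem.Chars.splitOn info.toList [',']
  let music := newMusicA (PySem.List.pyGetD parts 3 [])
  PySem.Chars.isIn m'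
    (PySem.List.pyRepeat music (PySem.Int.floordiv (pvF info).2 (music.length : Int))
      ++ PySem.List.slice music none (some (PySem.Int.mod (pvF info).2 (music.length : Int))))

-- running-max step on (title, duration) pairs
def pvStep (cur pr : String × Int) : String × Int := if cur.2 < pr.2 then pr else cur

-- A's loop collects exactly the matching (title, duration) pairs
theorem A_answer (m' : List Char) (l : List String) :
    l.foldl (fun (answer : List (String × Int)) musicinfo =>
      let parts := PySem.Chars.splitOn musicinfo.toList [',']
      let t0 := (PySem.Chars.splitOn (PySem.List.pyGetD parts 0 []) [':']).map
          (fun x => (PySem.Int.ofChars? x).getD 0)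
      let t1 := (PySem.Chars.splitOn (PySem.List.pyGetD parts 1 []) [':']).map
          (fun x => (PySem.Int.ofChars? x).getD 0)
      let musiclen := (PySem.List.pyGetD t1 0 0 * 60 + PySem.List.pyGetD t1 1 0)
          - (PySem.List.pyGetD t0 0 0 * 60 + PySem.List.pyGetD t0 1 0)
      let music := newMusicA (PySem.List.pyGetD parts 3 [])
      let tmp := PySem.List.pyRepeat music (PySem.Int.floordiv musiclen (music.length : Int))
          ++ PySem.List.slice music none (some (PySem.Int.mod musiclen (music.length : Int)))
      if PySem.Chars.isIn m' tmp then answer ++ [(String.ofList (PySem.List.pyGetD parts 2 []), musiclen)]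
      else answer) []
    = ((l.filter (pvP m')).map pvF) := by
  have h : (fun (answer : List (String × Int)) (musicinfo : String) =>
      let parts := PySem.Chars.splitOn musicinfo.toList [',']
      let t0 := (PySem.Chars.splitOn (PySem.List.pyGetD parts 0 []) [':']).map
          (fun x => (PySem.Int.ofChars? x).getD 0)
      let t1 := (PySem.Chars.splitOn (PySem.List.pyGetD parts 1 []) [':']).map
          (fun x => (PySem.Int.ofChars? x).getD 0)
      let musiclen := (PySem.List.pyGetD t1 0 0 * 60 + PySem.List.pyGetD t1 1 0)
          - (PySem.List.pyGetD t0 0 0 * 60 + PySem.List.pyGetD t0 1 0)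
      let music := newMusicA (PySem.List.pyGetD parts 3 [])
      let tmp := PySem.List.pyRepeat music (PySem.Int.floordiv musiclen (music.length : Int))
          ++ PySem.List.slice music none (some (PySem.Int.mod musiclen (music.length : Int)))
      if PySem.Chars.isIn m' tmp then answer ++ [(String.ofList (PySem.List.pyGetD parts 2 []), musiclen)]
      else answer)
      = (fun acc x => if pvP m' x then acc ++ [pvF x] else acc) := by
    funext acc x; simp only [pvP, pvF]
  rw [h, PySem.List.foldl_append_if]
  simp

-- B's loop from a committed best (t, some b) is the running max over the matched pairs
theorem B_fold_some (m' : List Char) (l : List String) :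
    ∀ (t : String) (b : Int),
    l.foldl (fun (best : String × Option Int) info =>
        if pvP m' info && best.2.all (fun v => decide (v < (pvF info).2))
        then ((pvF info).1, some (pvF info).2) else best) (t, some b)
    = ((((l.filter (pvP m')).map pvF).foldl pvStep (t, b)).1,
       some ((((l.filter (pvP m')).map pvF).foldl pvStep (t, b)).2)) := by
  induction l with
  | nil => intro t b; rfl
  | cons x l ih =>
    intro t b
    rw [List.foldl_cons, List.filter_cons]
    by_cases hp : pvP m' x
    · rw [if_pos hp, List.map_cons, List.foldl_cons]
      by_cases hb : b < (pvF x).2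
      · rw [if_pos (show (pvP m' x && Option.all (fun v => decide (v < (pvF x).2)) (some b)) = true
            by simp [hp, hb]), ih]
        have hs : pvStep (t, b) (pvF x) = pvF x := by simp [pvStep, hb]
        rw [hs]
      · rw [if_neg (show ¬ (pvP m' x && Option.all (fun v => decide (v < (pvF x).2)) (some b)) = true
            by simp [hp, hb]), ih]
        have hs : pvStep (t, b) (pvF x) = (t, b) := by simp [pvStep, hb]
        rw [hs]
    · rw [if_neg hp,
        if_neg (show ¬ (pvP m' x && Option.all (fun v => decide (v < (pvF x).2)) (some b)) = true
          by simp [hp])]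
      exact ih t b

-- B's whole loop, from the initial ("(None)", none)
theorem B_fold (m' : List Char) (l : List String) :
    l.foldl (fun (best : String × Option Int) info =>
        if pvP m' info && best.2.all (fun v => decide (v < (pvF info).2))
        then ((pvF info).1, some (pvF info).2) else best) ("(None)", none)
    = (match (l.filter (pvP m')).map pvF with
       | [] => (("(None)" : String), (none : Option Int))
       | pr :: rest => ((rest.foldl pvStep pr).1, some ((rest.foldl pvStep pr).2))) := by
  induction l with
  | nil => rfl
  | cons x l ih =>
    rw [List.foldl_cons, List.filter_cons]
    by_cases hp : pvP m' x
    · rw [if_pos hp,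
        if_pos (show (pvP m' x && Option.all (fun v => decide (v < (pvF x).2)) (none : Option Int)) = true
          by simp [hp]),
        B_fold_some m' l, List.map_cons]
    · rw [if_neg hp,
        if_neg (show ¬ (pvP m' x && Option.all (fun v => decide (v < (pvF x).2)) (none : Option Int)) = true
          by simp [hp])]
      exact ih

-- one unfolding of insertBy on a cons
theorem insertBy_cons (bf : (String × Int) → (String × Int) → Bool) (x y : String × Int)
    (ys : List (String × Int)) :
    PySem.List.insertBy bf x (y :: ys)
      = if bf x y then x :: y :: ys else y :: PySem.List.insertBy bf x ys := rfl

-- the head of A's insertion sort (key -x.2) is the running max over the pairs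
theorem fold_ins_head (l : List (String × Int)) :
    ∀ (y : String × Int) (ys : List (String × Int)),
    ∃ zs, l.foldl (fun acc x =>
        PySem.List.insertBy (fun a b => decide ((fun p : String × Int => -p.2) a
          < (fun p : String × Int => -p.2) b)) x acc) (y :: ys)
      = (l.foldl pvStep y) :: zs := by
  induction l with
  | nil => intro y ys; exact ⟨ys, rfl⟩
  | cons x l ih =>
    intro y ys
    rw [List.foldl_cons, insertBy_cons, List.foldl_cons]
    by_cases h : y.2 < x.2
    · have hb : decide ((-x.2 : Int) < -y.2) = true := by simp; omega
      simp only [hb, if_pos]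
      have := ih x (y :: ys)
      simpa [pvStep, h] using this
    · have hb : decide ((-x.2 : Int) < -y.2) = false := by simp; omega
      simp only [hb]
      simp only [Bool.false_eq_true, if_false]
      have := ih y (PySem.List.insertBy
        (fun a b => decide ((fun p : String × Int => -p.2) a < (fun p : String × Int => -p.2) b)) x ys)
      simpa [pvStep, h] using this

-- ===== VERDICT (by name: the statement is the Claim_ definition above) =====
theorem solution_spec : Claim_equal_solution := by
  intro m musicinfos _hDom _hPre
  show solution m musicinfos = solution_alt m musicinfos
  have hB : musicinfos.foldl (fun (best : String × Option Int) info =>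
      let parts := PySem.Chars.splitOn info.toList [',']
      let dur := minutesB (PySem.List.pyGetD parts 1 []) - minutesB (PySem.List.pyGetD parts 0 [])
      let sheet := normChars (PySem.List.pyGetD parts 3 [])
      let played := PySem.List.pyRepeat sheet (PySem.Int.floordiv dur (sheet.length : Int))
          ++ PySem.List.slice sheet none (some (PySem.Int.mod dur (sheet.length : Int)))
      if PySem.Chars.isIn (normChars m.toList) played && best.2.all (fun b => decide (b < dur))
      then (String.ofList (PySem.List.pyGetD parts 2 []), some dur)
      else best) ("(None)", none)
      = musicinfos.foldl (fun (best : String × Option Int) info =>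
        if pvP (newMusicA m.toList) info && best.2.all (fun v => decide (v < (pvF info).2))
        then ((pvF info).1, some (pvF info).2) else best) ("(None)", none) := by
    apply PySem.List.foldl_congr_mem
    intro acc x _
    simp only [pvP, pvF, minutesB, norm_eq]
    rfl
  show (if (musicinfos.foldl (fun (answer : List (String × Int)) musicinfo =>
      let parts := PySem.Chars.splitOn musicinfo.toList [',']
      let t0 := (PySem.Chars.splitOn (PySem.List.pyGetD parts 0 []) [':']).map
          (fun x => (PySem.Int.ofChars? x).getD 0)
      let t1 := (PySem.Chars.splitOn (PySem.List.pyGetD parts 1 []) [':']).map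
          (fun x => (PySem.Int.ofChars? x).getD 0)
      let musiclen := (PySem.List.pyGetD t1 0 0 * 60 + PySem.List.pyGetD t1 1 0)
          - (PySem.List.pyGetD t0 0 0 * 60 + PySem.List.pyGetD t0 1 0)
      let music := newMusicA (PySem.List.pyGetD parts 3 [])
      let tmp := PySem.List.pyRepeat music (PySem.Int.floordiv musiclen (music.length : Int))
          ++ PySem.List.slice music none (some (PySem.Int.mod musiclen (music.length : Int)))
      if PySem.Chars.isIn (newMusicA m.toList) tmp then
        answer ++ [(String.ofList (PySem.List.pyGetD parts 2 []), musiclen)]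
      else answer) []) = ([] : List (String × Int)) then "(None)"
    else
      (PySem.List.pyGetD
        (if 1 < (musicinfos.foldl (fun (answer : List (String × Int)) musicinfo =>
            let parts := PySem.Chars.splitOn musicinfo.toList [',']
            let t0 := (PySem.Chars.splitOn (PySem.List.pyGetD parts 0 []) [':']).map
                (fun x => (PySem.Int.ofChars? x).getD 0)
            let t1 := (PySem.Chars.splitOn (PySem.List.pyGetD parts 1 []) [':']).map
                (fun x => (PySem.Int.ofChars? x).getD 0)
            let musiclen := (PySem.List.pyGetD t1 0 0 * 60 + PySem.List.pyGetD t1 1 0)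
                - (PySem.List.pyGetD t0 0 0 * 60 + PySem.List.pyGetD t0 1 0)
            let music := newMusicA (PySem.List.pyGetD parts 3 [])
            let tmp := PySem.List.pyRepeat music (PySem.Int.floordiv musiclen (music.length : Int))
                ++ PySem.List.slice music none (some (PySem.Int.mod musiclen (music.length : Int)))
            if PySem.Chars.isIn (newMusicA m.toList) tmp then
              answer ++ [(String.ofList (PySem.List.pyGetD parts 2 []), musiclen)]
            else answer) []).length
         then PySem.List.sorted (musicinfos.foldl (fun (answer : List (String × Int)) musicinfo =>
            let parts := PySem.Chars.splitOn musicinfo.toList [',']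
            let t0 := (PySem.Chars.splitOn (PySem.List.pyGetD parts 0 []) [':']).map
                (fun x => (PySem.Int.ofChars? x).getD 0)
            let t1 := (PySem.Chars.splitOn (PySem.List.pyGetD parts 1 []) [':']).map
                (fun x => (PySem.Int.ofChars? x).getD 0)
            let musiclen := (PySem.List.pyGetD t1 0 0 * 60 + PySem.List.pyGetD t1 1 0)
                - (PySem.List.pyGetD t0 0 0 * 60 + PySem.List.pyGetD t0 1 0)
            let music := newMusicA (PySem.List.pyGetD parts 3 [])
            let tmp := PySem.List.pyRepeat music (PySem.Int.floordiv musiclen (music.length : Int))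
                ++ PySem.List.slice music none (some (PySem.Int.mod musiclen (music.length : Int)))
            if PySem.Chars.isIn (newMusicA m.toList) tmp then
              answer ++ [(String.ofList (PySem.List.pyGetD parts 2 []), musiclen)]
            else answer) []) (fun x => -x.2)
         else musicinfos.foldl (fun (answer : List (String × Int)) musicinfo =>
            let parts := PySem.Chars.splitOn musicinfo.toList [',']
            let t0 := (PySem.Chars.splitOn (PySem.List.pyGetD parts 0 []) [':']).map
                (fun x => (PySem.Int.ofChars? x).getD 0)
            let t1 := (PySem.Chars.splitOn (PySem.List.pyGetD parts 1 []) [':']).map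
                (fun x => (PySem.Int.ofChars? x).getD 0)
            let musiclen := (PySem.List.pyGetD t1 0 0 * 60 + PySem.List.pyGetD t1 1 0)
                - (PySem.List.pyGetD t0 0 0 * 60 + PySem.List.pyGetD t0 1 0)
            let music := newMusicA (PySem.List.pyGetD parts 3 [])
            let tmp := PySem.List.pyRepeat music (PySem.Int.floordiv musiclen (music.length : Int))
                ++ PySem.List.slice music none (some (PySem.Int.mod musiclen (music.length : Int)))
            if PySem.Chars.isIn (newMusicA m.toList) tmp then
              answer ++ [(String.ofList (PySem.List.pyGetD parts 2 []), musiclen)]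
            else answer) []) 0 ("", 0)).1)
    = (musicinfos.foldl (fun (best : String × Option Int) info =>
        let parts := PySem.Chars.splitOn info.toList [',']
        let dur := minutesB (PySem.List.pyGetD parts 1 []) - minutesB (PySem.List.pyGetD parts 0 [])
        let sheet := normChars (PySem.List.pyGetD parts 3 [])
        let played := PySem.List.pyRepeat sheet (PySem.Int.floordiv dur (sheet.length : Int))
            ++ PySem.List.slice sheet none (some (PySem.Int.mod dur (sheet.length : Int)))
        if PySem.Chars.isIn (normChars m.toList) played && best.2.all (fun b => decide (b < dur))
        then (String.ofList (PySem.List.pyGetD parts 2 []), some dur)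
        else best) ("(None)", none)).1
  rw [A_answer (newMusicA m.toList) musicinfos, hB, B_fold]
  cases hfm : (musicinfos.filter (pvP (newMusicA m.toList))).map pvF with
  | nil => simp
  | cons pr rest =>
    cases rest with
    | nil =>
      simp [PySem.List.pyGetD_zero_cons]
    | cons q qs =>
      rw [if_neg (show ¬ (pr :: q :: qs = ([] : List (String × Int))) by simp),
        if_pos (show 1 < (pr :: q :: qs).length by simp)]
      rw [PySem.List.sorted_eq_foldl_insertBy, List.foldl_cons]
      have h0 : PySem.List.insertBy (fun a b =>
          decide ((fun p : String × Int => -p.2) a < (fun p : String × Int => -p.2) b)) pr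
          ([] : List (String × Int)) = [pr] := rfl
      rw [h0]
      obtain ⟨zs, hzs⟩ := fold_ins_head (q :: qs) pr []
      rw [hzs]
      simp [PySem.List.pyGetD_zero_cons]
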